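-- pv_equiv track=rewrite | github.com/Vijolite/Python | CodeSignal_solutions/bishopAndPawn.py | bishopAndPawn
-- ===== SOURCE A (Python) =====
-- def bishopAndPawn(bishop, pawn):
--     Bc=bishop[0]
--     Bl=int(bishop[1])
--     Pc=pawn[0]
--     Pl=pawn[1]
--     while Bc<'h' and Bl>1:
--         Bc=chr(ord(Bc)+1)
--         Bl-=1
--         if Bc==Pc and str(Bl)==Pl:
--             return True
--     Bc=bishop[0]
--     Bl=int(bishop[1])
--     while Bc>'a' and Bl<8:
--         Bc=chr(ord(Bc)-1)
--         Bl+=1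
--         if Bc==Pc and str(Bl)==Pl:
--             return True
--     Bc=bishop[0]
--     Bl=int(bishop[1])
--     while Bc>'a' and Bl>1:
--         Bc=chr(ord(Bc)-1)
--         Bl-=1
--         if Bc==Pc and str(Bl)==Pl:
--             return True
--     Bc=bishop[0]
--     Bl=int(bishop[1])
--     while Bc<'h' and Bl<8:
--         Bc=chr(ord(Bc)+1)
--         Bl+=1
--         if Bc==Pc and str(Bl)==Pl:
--             return True
--     return False
-- ===== SOURCE B (Python) =====
-- FILES = 'abcdefgh'
-- RANKS = '12345678'
--
-- def bishopAndPawn(bishop, pawn):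
--     brow = int(bishop[1])
--     pfile, prank = pawn[0], pawn[1]
--     if bishop[0] not in FILES or pfile not in FILES or prank not in RANKS:
--         return False
--     dc = ord(pfile) - ord(bishop[0])
--     dr = int(prank) - brow
--     return dc != 0 and abs(dc) == abs(dr)
-- ===== Notes on version B (the rewrite author's own statement) =====
-- stated objective: simpler
-- what changed: Replaces the four diagonal-walking while loops with board validation against FILES/RANKS plus the closed-form same-diagonal test |dcol| == |drow| != 0, no loop at all.
-- intended difference: When the bishop's file character is not 'a'..'h', A keeps walking through neighbouring character codes and returns True for a pawn on that walk line, reporting an attack from a square that is not on the board; B returns False there, which is the intended value since such a bishop square does not exist. — e.g. on bishopAndPawn("i8", "h7"): A returns true, B returns false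
import Mathlib
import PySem

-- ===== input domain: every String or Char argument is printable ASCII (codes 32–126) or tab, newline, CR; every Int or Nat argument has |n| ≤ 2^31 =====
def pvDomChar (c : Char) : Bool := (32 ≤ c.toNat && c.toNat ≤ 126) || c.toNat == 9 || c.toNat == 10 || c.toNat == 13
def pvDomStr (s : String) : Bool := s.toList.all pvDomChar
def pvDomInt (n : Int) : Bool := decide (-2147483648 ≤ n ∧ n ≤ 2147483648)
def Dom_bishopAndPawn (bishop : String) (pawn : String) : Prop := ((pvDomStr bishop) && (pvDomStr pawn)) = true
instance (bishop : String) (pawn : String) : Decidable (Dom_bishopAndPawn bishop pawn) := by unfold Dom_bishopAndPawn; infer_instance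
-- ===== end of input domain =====

-- B replaces A's four diagonal-walking loops by board validation plus the closed-form
-- same-diagonal test |dcol| = |drow| ≠ 0 (objective: simpler); A = B outside D_ below.

-- ===== PORT A =====
-- the four while loops of A, one recursive helper each (state: current column Bc, current row Bl)
def pvRay1 (Bc : Char) (Bl : Int) (Pc Pl : Char) : Bool :=
  -- while Bc<'h' and Bl>1: Bc+=1; Bl-=1; if hit return True
  if h : Bc < 'h' ∧ 1 < Bl then
    let Bc' := Char.ofNat (Bc.toNat + 1)
    let Bl' := Bl - 1
    if Bc' = Pc ∧ PySem.Int.toStr Bl' = String.ofList [Pl] then true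
    else pvRay1 Bc' Bl' Pc Pl
  else false
termination_by (Bl - 1).toNat
decreasing_by omega

def pvRay2 (Bc : Char) (Bl : Int) (Pc Pl : Char) : Bool :=
  -- while Bc>'a' and Bl<8: Bc-=1; Bl+=1; if hit return True
  if h : 'a' < Bc ∧ Bl < 8 then
    let Bc' := Char.ofNat (Bc.toNat - 1)
    let Bl' := Bl + 1
    if Bc' = Pc ∧ PySem.Int.toStr Bl' = String.ofList [Pl] then true
    else pvRay2 Bc' Bl' Pc Pl
  else false
termination_by (8 - Bl).toNat
decreasing_by omega

def pvRay3 (Bc : Char) (Bl : Int) (Pc Pl : Char) : Bool :=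
  -- while Bc>'a' and Bl>1: Bc-=1; Bl-=1; if hit return True
  if h : 'a' < Bc ∧ 1 < Bl then
    let Bc' := Char.ofNat (Bc.toNat - 1)
    let Bl' := Bl - 1
    if Bc' = Pc ∧ PySem.Int.toStr Bl' = String.ofList [Pl] then true
    else pvRay3 Bc' Bl' Pc Pl
  else false
termination_by (Bl - 1).toNat
decreasing_by omega

def pvRay4 (Bc : Char) (Bl : Int) (Pc Pl : Char) : Bool :=
  -- while Bc<'h' and Bl<8: Bc+=1; Bl+=1; if hit return True
  if h : Bc < 'h' ∧ Bl < 8 then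
    let Bc' := Char.ofNat (Bc.toNat + 1)
    let Bl' := Bl + 1
    if Bc' = Pc ∧ PySem.Int.toStr Bl' = String.ofList [Pl] then true
    else pvRay4 Bc' Bl' Pc Pl
  else false
termination_by (8 - Bl).toNat
decreasing_by omega

def bishopAndPawn (bishop : String) (pawn : String) : Bool :=
  match PySem.Str.pyGet? bishop 0, PySem.Str.pyGet? bishop 1,
        PySem.Str.pyGet? pawn 0, PySem.Str.pyGet? pawn 1 with
  | some Bc, some b1, some Pc, some Pl =>
    match PySem.Int.ofStr? (String.ofList [b1]) with
    | some Bl => pvRay1 Bc Bl Pc Pl || pvRay2 Bc Bl Pc Pl || pvRay3 Bc Bl Pc Pl || pvRay4 Bc Bl Pc Pl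
    | none => false   -- int(bishop[1]) raises ValueError: excluded by Pre_
  | _, _, _, _ => false   -- IndexError on a short string: excluded by Pre_

-- ===== PORT B =====
def pvFiles : String := "abcdefgh"
def pvRanks : String := "12345678"

def bishopAndPawn_alt (bishop : String) (pawn : String) : Bool :=
  -- option plumbing via casesOn; `x in FILES` for a single character x is char membership
  (PySem.Str.pyGet? bishop 1).casesOn false fun b1 =>
  (PySem.Int.ofStr? (String.ofList [b1])).casesOn false fun row =>
  (PySem.Str.pyGet? pawn 0).casesOn false fun p0 =>
  (PySem.Str.pyGet? pawn 1).casesOn false fun p1 =>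
  (PySem.Str.pyGet? bishop 0).casesOn false fun b0 =>
  if !(pvFiles.toList.contains b0) || !(pvFiles.toList.contains p0) || !(pvRanks.toList.contains p1) then
    false
  else
    (PySem.Int.ofStr? (String.ofList [p1])).casesOn false fun rp =>
    let dc : Int := (p0.toNat : Int) - (b0.toNat : Int)
    let dr : Int := rp - row
    decide (dc ≠ 0 ∧ dc.natAbs = dr.natAbs)

-- ===== PRECONDITION & SPEC =====
-- Pre_ excludes exactly the inputs on which A raises: a bishop or pawn string of length < 2
-- (IndexError) or a bishop whose second character is not a decimal digit (ValueError from int()).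
def Pre_bishopAndPawn (bishop : String) (pawn : String) : Prop :=
  2 ≤ bishop.toList.length ∧ 2 ≤ pawn.toList.length ∧
  48 ≤ (bishop.toList.getD 1 ' ').toNat ∧ (bishop.toList.getD 1 ' ').toNat ≤ 57
instance (bishop : String) (pawn : String) : Decidable (Pre_bishopAndPawn bishop pawn) := by
  unfold Pre_bishopAndPawn; infer_instance

def pvWitness_bishopAndPawn : String × String := ("a1", "c3")

-- When the bishop's file character is not one of 'a'..'h', A still walks through neighbouring
-- character codes and returns True for a pawn lying on that walk line, i.e. it reports an attack
-- from a square that is not on the chessboard; B returns False there, the intended value.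
def D_bishopAndPawn (bishop : String) (pawn : String) : Prop :=
  let b0 := bishop.toList.head!
  let b1 := bishop.toList.tail.head!
  let p0 := pawn.toList.head!
  let p1 := pawn.toList.tail.head!
  '1' ≤ p1 ∧ p1 ≤ '8' ∧
  (p0.toNat + b1.toNat = b0.toNat + p1.toNat ∨ p0.toNat + p1.toNat = b0.toNat + b1.toNat) ∧
  (b0 < p0 ∧ p0 ≤ 'h' ∧ b0 < 'a' ∨ 'a' ≤ p0 ∧ p0 < b0 ∧ 'h' < b0)
instance (bishop : String) (pawn : String) : Decidable (D_bishopAndPawn bishop pawn) := by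
  unfold D_bishopAndPawn; infer_instance

def Spec_bishopAndPawn (bishop : String) (pawn : String) (out : Bool) : Prop :=
  ¬ D_bishopAndPawn bishop pawn → out = bishopAndPawn_alt bishop pawn
instance (bishop : String) (pawn : String) (out : Bool) : Decidable (Spec_bishopAndPawn bishop pawn out) := by
  unfold Spec_bishopAndPawn; infer_instance

def pvDiffWitness_bishopAndPawn : String × String := ("i8", "h7")
def pvDiffWitnessOut_bishopAndPawn : Bool × Bool := (true, false)

-- ===== CLAIM (what is proved, stated in full; the proofs are below) =====
def Claim_unchanged_bishopAndPawn : Prop := ∀ (bishop : String) (pawn : String), Dom_bishopAndPawn bishop pawn → Pre_bishopAndPawn bishop pawn → Spec_bishopAndPawn bishop pawn (bishopAndPawn bishop pawn)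
def Claim_changed_bishopAndPawn : Prop := Dom_bishopAndPawn (pvDiffWitness_bishopAndPawn.1) (pvDiffWitness_bishopAndPawn.2) ∧ Pre_bishopAndPawn (pvDiffWitness_bishopAndPawn.1) (pvDiffWitness_bishopAndPawn.2) ∧ D_bishopAndPawn (pvDiffWitness_bishopAndPawn.1) (pvDiffWitness_bishopAndPawn.2) ∧ bishopAndPawn (pvDiffWitness_bishopAndPawn.1) (pvDiffWitness_bishopAndPawn.2) = pvDiffWitnessOut_bishopAndPawn.1 ∧ bishopAndPawn_alt (pvDiffWitness_bishopAndPawn.1) (pvDiffWitness_bishopAndPawn.2) = pvDiffWitnessOut_bishopAndPawn.2 ∧ pvDiffWitnessOut_bishopAndPawn.1 ≠ pvDiffWitnessOut_bishopAndPawn.2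
def Claim_exact_bishopAndPawn : Prop := ∀ (bishop : String) (pawn : String), Dom_bishopAndPawn bishop pawn → Pre_bishopAndPawn bishop pawn → D_bishopAndPawn bishop pawn → bishopAndPawn bishop pawn ≠ bishopAndPawn_alt bishop pawn

-- ===== LEMMAS AND PROOFS =====
lemma char_lt_iff (c d : Char) : (c < d) ↔ c.toNat < d.toNat := by
  change c.val < d.val ↔ _
  rw [UInt32.lt_iff_toNat_lt]; rfl

lemma char_le_iff (c d : Char) : (c ≤ d) ↔ c.toNat ≤ d.toNat := by
  change c.val ≤ d.val ↔ _
  rw [UInt32.le_iff_toNat_le]; rfl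

lemma char_toNat_inj {c d : Char} (h : c.toNat = d.toNat) : c = d := by
  rw [← Char.ofNat_toNat c, h, Char.ofNat_toNat]

lemma char_toNat_ofNat {n : Nat} (h : n < 55296) : (Char.ofNat n).toNat = n := by
  simp [Char.ofNat, Nat.isValidChar, h]

lemma single_case {s : String} {c : Char} (hs : s = String.ofList [c]) (Pl : Char) :
    (s = String.ofList [Pl]) ↔ Pl = c := by
  subst hs
  constructor
  · intro h
    have := congrArg String.toList h
    simpa using this.symm
  · intro h; rw [h]

lemma toStr_single (m : Int) (Pl : Char) (h1 : 1 ≤ m) (h8 : m ≤ 8) :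
    (PySem.Int.toStr m = String.ofList [Pl]) ↔ (Pl.toNat : Int) = 48 + m := by
  interval_cases m
  · rw [single_case (c := '1') (by decide) Pl]
    constructor
    · rintro rfl; decide
    · intro h
      exact char_toNat_inj (by have hx : ('1').toNat = 49 := by decide
                               omega)
  · rw [single_case (c := '2') (by decide) Pl]
    constructor
    · rintro rfl; decide
    · intro h
      exact char_toNat_inj (by have hx : ('2').toNat = 50 := by decide
                               omega)
  · rw [single_case (c := '3') (by decide) Pl]
    constructor
    · rintro rfl; decide
    · intro h
      exact char_toNat_inj (by have hx : ('3').toNat = 51 := by decide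
                               omega)
  · rw [single_case (c := '4') (by decide) Pl]
    constructor
    · rintro rfl; decide
    · intro h
      exact char_toNat_inj (by have hx : ('4').toNat = 52 := by decide
                               omega)
  · rw [single_case (c := '5') (by decide) Pl]
    constructor
    · rintro rfl; decide
    · intro h
      exact char_toNat_inj (by have hx : ('5').toNat = 53 := by decide
                               omega)
  · rw [single_case (c := '6') (by decide) Pl]
    constructor
    · rintro rfl; decide
    · intro h
      exact char_toNat_inj (by have hx : ('6').toNat = 54 := by decide
                               omega)
  · rw [single_case (c := '7') (by decide) Pl]
    constructor
    · rintro rfl; decide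
    · intro h
      exact char_toNat_inj (by have hx : ('7').toNat = 55 := by decide
                               omega)
  · rw [single_case (c := '8') (by decide) Pl]
    constructor
    · rintro rfl; decide
    · intro h
      exact char_toNat_inj (by have hx : ('8').toNat = 56 := by decide
                               omega)

lemma ofStr?_digit (c : Char) (h48 : 48 ≤ c.toNat) (h57 : c.toNat ≤ 57) :
    PySem.Int.ofStr? (String.ofList [c]) = some ((c.toNat : Int) - 48) := by
  have : c.toNat = 48 ∨ c.toNat = 49 ∨ c.toNat = 50 ∨ c.toNat = 51 ∨ c.toNat = 52 ∨
      c.toNat = 53 ∨ c.toNat = 54 ∨ c.toNat = 55 ∨ c.toNat = 56 ∨ c.toNat = 57 := by omega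
  rcases this with h | h | h | h | h | h | h | h | h | h
  · have hc : c = '0' := char_toNat_inj (by rw [h]; decide)
    rw [hc]; decide
  · have hc : c = '1' := char_toNat_inj (by rw [h]; decide)
    rw [hc]; decide
  · have hc : c = '2' := char_toNat_inj (by rw [h]; decide)
    rw [hc]; decide
  · have hc : c = '3' := char_toNat_inj (by rw [h]; decide)
    rw [hc]; decide
  · have hc : c = '4' := char_toNat_inj (by rw [h]; decide)
    rw [hc]; decide
  · have hc : c = '5' := char_toNat_inj (by rw [h]; decide)
    rw [hc]; decide
  · have hc : c = '6' := char_toNat_inj (by rw [h]; decide)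
    rw [hc]; decide
  · have hc : c = '7' := char_toNat_inj (by rw [h]; decide)
    rw [hc]; decide
  · have hc : c = '8' := char_toNat_inj (by rw [h]; decide)
    rw [hc]; decide
  · have hc : c = '9' := char_toNat_inj (by rw [h]; decide)
    rw [hc]; decide

lemma files_iff (c : Char) : (pvFiles.toList.contains c = true) ↔ (97 ≤ c.toNat ∧ c.toNat ≤ 104) := by
  rw [show pvFiles.toList = ['a','b','c','d','e','f','g','h'] from by decide]
  simp only [List.contains_cons, List.contains_nil, Bool.or_eq_true, beq_iff_eq, Bool.or_false]
  constructor
  · rintro (h|h|h|h|h|h|h|h) <;> subst h <;> exact ⟨by decide, by decide⟩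
  · rintro ⟨h1, h2⟩
    have : c.toNat = 97 ∨ c.toNat = 98 ∨ c.toNat = 99 ∨ c.toNat = 100 ∨ c.toNat = 101 ∨
        c.toNat = 102 ∨ c.toNat = 103 ∨ c.toNat = 104 := by omega
    rcases this with h|h|h|h|h|h|h|h
    · exact Or.inl (char_toNat_inj (by rw [h]; decide))
    · exact Or.inr (Or.inl (char_toNat_inj (by rw [h]; decide)))
    · exact Or.inr (Or.inr (Or.inl (char_toNat_inj (by rw [h]; decide))))
    · exact Or.inr (Or.inr (Or.inr (Or.inl (char_toNat_inj (by rw [h]; decide)))))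
    · exact Or.inr (Or.inr (Or.inr (Or.inr (Or.inl (char_toNat_inj (by rw [h]; decide))))))
    · exact Or.inr (Or.inr (Or.inr (Or.inr (Or.inr (Or.inl (char_toNat_inj (by rw [h]; decide)))))))
    · exact Or.inr (Or.inr (Or.inr (Or.inr (Or.inr (Or.inr (Or.inl (char_toNat_inj (by rw [h]; decide))))))))
    · exact Or.inr (Or.inr (Or.inr (Or.inr (Or.inr (Or.inr (Or.inr (char_toNat_inj (by rw [h]; decide))))))))

lemma ranks_iff (c : Char) : (pvRanks.toList.contains c = true) ↔ (49 ≤ c.toNat ∧ c.toNat ≤ 56) := by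
  rw [show pvRanks.toList = ['1','2','3','4','5','6','7','8'] from by decide]
  simp only [List.contains_cons, List.contains_nil, Bool.or_eq_true, beq_iff_eq, Bool.or_false]
  constructor
  · rintro (h|h|h|h|h|h|h|h) <;> subst h <;> exact ⟨by decide, by decide⟩
  · rintro ⟨h1, h2⟩
    have : c.toNat = 49 ∨ c.toNat = 50 ∨ c.toNat = 51 ∨ c.toNat = 52 ∨ c.toNat = 53 ∨
        c.toNat = 54 ∨ c.toNat = 55 ∨ c.toNat = 56 := by omega
    rcases this with h|h|h|h|h|h|h|h
    · exact Or.inl (char_toNat_inj (by rw [h]; decide))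
    · exact Or.inr (Or.inl (char_toNat_inj (by rw [h]; decide)))
    · exact Or.inr (Or.inr (Or.inl (char_toNat_inj (by rw [h]; decide))))
    · exact Or.inr (Or.inr (Or.inr (Or.inl (char_toNat_inj (by rw [h]; decide)))))
    · exact Or.inr (Or.inr (Or.inr (Or.inr (Or.inl (char_toNat_inj (by rw [h]; decide))))))
    · exact Or.inr (Or.inr (Or.inr (Or.inr (Or.inr (Or.inl (char_toNat_inj (by rw [h]; decide)))))))
    · exact Or.inr (Or.inr (Or.inr (Or.inr (Or.inr (Or.inr (Or.inl (char_toNat_inj (by rw [h]; decide))))))))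
    · exact Or.inr (Or.inr (Or.inr (Or.inr (Or.inr (Or.inr (Or.inr (char_toNat_inj (by rw [h]; decide))))))))

lemma ray1_iff (c : Char) (r : Int) (Pc Pl : Char) :
    pvRay1 c r Pc Pl = true ↔
      c < Pc ∧ Pc ≤ 'h' ∧ 1 ≤ r - ((Pc.toNat : Int) - c.toNat) ∧
        PySem.Int.toStr (r - ((Pc.toNat : Int) - c.toNat)) = String.ofList [Pl] := by
  fun_induction pvRay1 c r Pc Pl with
  | case1 c r h Bc' Bl' heq =>
    have hc : c.toNat < 104 := (char_lt_iff c 'h').mp h.1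
    have hBc' : Bc'.toNat = c.toNat + 1 := char_toNat_ofNat (by omega)
    obtain ⟨hPc, hstr⟩ := heq
    have hPcn : (Pc.toNat : Int) - c.toNat = 1 := by
      rw [← hPc, hBc']; push_cast; ring
    refine iff_of_true rfl ⟨?_, ?_, ?_, ?_⟩
    · rw [char_lt_iff]; omega
    · rw [char_le_iff]; rw [← hPc, hBc']; show c.toNat + 1 ≤ 104; omega
    · omega
    · rw [hPcn]; exact hstr
  | case2 c r h Bc' Bl' heq ih =>
    have hc : c.toNat < 104 := (char_lt_iff c 'h').mp h.1
    have hBc' : Bc'.toNat = c.toNat + 1 := char_toNat_ofNat (by omega)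
    rw [ih]
    by_cases hp : Pc.toNat = c.toNat + 1
    · have hPcB : Bc' = Pc := char_toNat_inj (by omega)
      have hstr : ¬ PySem.Int.toStr (r - 1) = String.ofList [Pl] := fun hs => heq ⟨hPcB, hs⟩
      constructor
      · rintro ⟨h1, _, _, _⟩
        exact absurd ((char_lt_iff _ _).mp h1) (by omega)
      · rintro ⟨_, _, _, h4⟩
        exact absurd h4 (by rw [show r - ((Pc.toNat : Int) - c.toNat) = r - 1 by omega]; exact hstr)
    · have harg : r - 1 - ((Pc.toNat : Int) - Bc'.toNat) = r - ((Pc.toNat : Int) - c.toNat) := by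
        rw [hBc']; push_cast; ring
      rw [harg]
      constructor
      · rintro ⟨h1, h2, h3, h4⟩
        refine ⟨(char_lt_iff _ _).mpr ?_, h2, h3, h4⟩
        have := (char_lt_iff _ _).mp h1; omega
      · rintro ⟨h1, h2, h3, h4⟩
        refine ⟨(char_lt_iff _ _).mpr ?_, h2, h3, h4⟩
        have := (char_lt_iff _ _).mp h1; omega
  | case3 c r h =>
    refine iff_of_false (by simp) ?_
    rintro ⟨h1, h2, h3, _⟩
    have h1' := (char_lt_iff _ _).mp h1
    have h2' := (char_le_iff _ _).mp h2
    have : ¬ (c.toNat < 104) ∨ ¬ (1 < r) := by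
      rcases not_and_or.mp h with hl | hr
      · left; intro hx; exact hl ((char_lt_iff c 'h').mpr hx)
      · right; intro hx; exact hr hx
    rcases this with hl | hr
    · have : ('h').toNat = 104 := by decide
      omega
    · omega

lemma ray2_iff (c : Char) (r : Int) (Pc Pl : Char) (hb : c.toNat < 55296) :
    pvRay2 c r Pc Pl = true ↔
      Pc < c ∧ 'a' ≤ Pc ∧ r + ((c.toNat : Int) - Pc.toNat) ≤ 8 ∧
        PySem.Int.toStr (r + ((c.toNat : Int) - Pc.toNat)) = String.ofList [Pl] := by
  revert hb
  fun_induction pvRay2 c r Pc Pl with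
  | case1 c r h Bc' Bl' heq =>
    intro hb
    have hc : 97 < c.toNat := (char_lt_iff 'a' c).mp h.1
    have hBc' : Bc'.toNat = c.toNat - 1 := char_toNat_ofNat (by omega)
    obtain ⟨hPc, hstr⟩ := heq
    have hPcn : (c.toNat : Int) - Pc.toNat = 1 := by
      rw [← hPc, hBc']; push_cast [Nat.cast_sub (by omega : 1 ≤ c.toNat)]; ring
    refine iff_of_true rfl ⟨?_, ?_, ?_, ?_⟩
    · rw [char_lt_iff]; omega
    · rw [char_le_iff]; rw [← hPc, hBc']; show 97 ≤ c.toNat - 1; omega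
    · omega
    · rw [hPcn]; exact hstr
  | case2 c r h Bc' Bl' heq ih =>
    intro hb
    have hc : 97 < c.toNat := (char_lt_iff 'a' c).mp h.1
    have hBc' : Bc'.toNat = c.toNat - 1 := char_toNat_ofNat (by omega)
    rw [ih (by omega)]
    by_cases hp : Pc.toNat = c.toNat - 1
    · have hPcB : Bc' = Pc := char_toNat_inj (by omega)
      have hstr : ¬ PySem.Int.toStr (r + 1) = String.ofList [Pl] := fun hs => heq ⟨hPcB, hs⟩
      constructor
      · rintro ⟨h1, _, _, _⟩
        exact absurd ((char_lt_iff _ _).mp h1) (by omega)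
      · rintro ⟨_, _, _, h4⟩
        refine absurd h4 ?_
        rw [show r + ((c.toNat : Int) - Pc.toNat) = r + 1 by omega]; exact hstr
    · have harg : r + 1 + ((Bc'.toNat : Int) - Pc.toNat) = r + ((c.toNat : Int) - Pc.toNat) := by
        rw [hBc']; push_cast [Nat.cast_sub (by omega : 1 ≤ c.toNat)]; ring
      rw [harg]
      constructor
      · rintro ⟨h1, h2, h3, h4⟩
        refine ⟨(char_lt_iff _ _).mpr ?_, h2, h3, h4⟩
        have := (char_lt_iff _ _).mp h1; omega
      · rintro ⟨h1, h2, h3, h4⟩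
        refine ⟨(char_lt_iff _ _).mpr ?_, h2, h3, h4⟩
        have := (char_lt_iff _ _).mp h1; omega
  | case3 c r h =>
    intro hb
    refine iff_of_false (by simp) ?_
    rintro ⟨h1, h2, h3, _⟩
    have h1' := (char_lt_iff _ _).mp h1
    have h2' := (char_le_iff _ _).mp h2
    have : ¬ (97 < c.toNat) ∨ ¬ (r < 8) := by
      rcases not_and_or.mp h with hl | hr
      · left; intro hx; exact hl ((char_lt_iff 'a' c).mpr hx)
      · right; intro hx; exact hr hx
    rcases this with hl | hr
    · have : ('a').toNat = 97 := by decide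
      omega
    · omega

lemma ray3_iff (c : Char) (r : Int) (Pc Pl : Char) (hb : c.toNat < 55296) :
    pvRay3 c r Pc Pl = true ↔
      Pc < c ∧ 'a' ≤ Pc ∧ 1 ≤ r - ((c.toNat : Int) - Pc.toNat) ∧
        PySem.Int.toStr (r - ((c.toNat : Int) - Pc.toNat)) = String.ofList [Pl] := by
  revert hb
  fun_induction pvRay3 c r Pc Pl with
  | case1 c r h Bc' Bl' heq =>
    intro hb
    have hc : 97 < c.toNat := (char_lt_iff 'a' c).mp h.1
    have hBc' : Bc'.toNat = c.toNat - 1 := char_toNat_ofNat (by omega)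
    obtain ⟨hPc, hstr⟩ := heq
    have hPcn : (c.toNat : Int) - Pc.toNat = 1 := by
      rw [← hPc, hBc']; push_cast [Nat.cast_sub (by omega : 1 ≤ c.toNat)]; ring
    refine iff_of_true rfl ⟨?_, ?_, ?_, ?_⟩
    · rw [char_lt_iff]; omega
    · rw [char_le_iff]; rw [← hPc, hBc']; show 97 ≤ c.toNat - 1; omega
    · omega
    · rw [hPcn]; exact hstr
  | case2 c r h Bc' Bl' heq ih =>
    intro hb
    have hc : 97 < c.toNat := (char_lt_iff 'a' c).mp h.1
    have hBc' : Bc'.toNat = c.toNat - 1 := char_toNat_ofNat (by omega)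
    rw [ih (by omega)]
    by_cases hp : Pc.toNat = c.toNat - 1
    · have hPcB : Bc' = Pc := char_toNat_inj (by omega)
      have hstr : ¬ PySem.Int.toStr (r - 1) = String.ofList [Pl] := fun hs => heq ⟨hPcB, hs⟩
      constructor
      · rintro ⟨h1, _, _, _⟩
        exact absurd ((char_lt_iff _ _).mp h1) (by omega)
      · rintro ⟨_, _, _, h4⟩
        refine absurd h4 ?_
        rw [show r - ((c.toNat : Int) - Pc.toNat) = r - 1 by omega]; exact hstr
    · have harg : r - 1 - ((Bc'.toNat : Int) - Pc.toNat) = r - ((c.toNat : Int) - Pc.toNat) := by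
        rw [hBc']; push_cast [Nat.cast_sub (by omega : 1 ≤ c.toNat)]; ring
      rw [harg]
      constructor
      · rintro ⟨h1, h2, h3, h4⟩
        refine ⟨(char_lt_iff _ _).mpr ?_, h2, h3, h4⟩
        have := (char_lt_iff _ _).mp h1; omega
      · rintro ⟨h1, h2, h3, h4⟩
        refine ⟨(char_lt_iff _ _).mpr ?_, h2, h3, h4⟩
        have := (char_lt_iff _ _).mp h1; omega
  | case3 c r h =>
    intro hb
    refine iff_of_false (by simp) ?_
    rintro ⟨h1, h2, h3, _⟩
    have h1' := (char_lt_iff _ _).mp h1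
    have h2' := (char_le_iff _ _).mp h2
    have : ¬ (97 < c.toNat) ∨ ¬ (1 < r) := by
      rcases not_and_or.mp h with hl | hr
      · left; intro hx; exact hl ((char_lt_iff 'a' c).mpr hx)
      · right; intro hx; exact hr hx
    rcases this with hl | hr
    · have : ('a').toNat = 97 := by decide
      omega
    · omega

lemma ray4_iff (c : Char) (r : Int) (Pc Pl : Char) :
    pvRay4 c r Pc Pl = true ↔
      c < Pc ∧ Pc ≤ 'h' ∧ r + ((Pc.toNat : Int) - c.toNat) ≤ 8 ∧
        PySem.Int.toStr (r + ((Pc.toNat : Int) - c.toNat)) = String.ofList [Pl] := by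
  fun_induction pvRay4 c r Pc Pl with
  | case1 c r h Bc' Bl' heq =>
    have hc : c.toNat < 104 := (char_lt_iff c 'h').mp h.1
    have hBc' : Bc'.toNat = c.toNat + 1 := char_toNat_ofNat (by omega)
    obtain ⟨hPc, hstr⟩ := heq
    have hPcn : (Pc.toNat : Int) - c.toNat = 1 := by
      rw [← hPc, hBc']; push_cast; ring
    refine iff_of_true rfl ⟨?_, ?_, ?_, ?_⟩
    · rw [char_lt_iff]; omega
    · rw [char_le_iff]; rw [← hPc, hBc']; show c.toNat + 1 ≤ 104; omega
    · omega
    · rw [hPcn]; exact hstr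
  | case2 c r h Bc' Bl' heq ih =>
    have hc : c.toNat < 104 := (char_lt_iff c 'h').mp h.1
    have hBc' : Bc'.toNat = c.toNat + 1 := char_toNat_ofNat (by omega)
    rw [ih]
    by_cases hp : Pc.toNat = c.toNat + 1
    · have hPcB : Bc' = Pc := char_toNat_inj (by omega)
      have hstr : ¬ PySem.Int.toStr (r + 1) = String.ofList [Pl] := fun hs => heq ⟨hPcB, hs⟩
      constructor
      · rintro ⟨h1, _, _, _⟩
        exact absurd ((char_lt_iff _ _).mp h1) (by omega)
      · rintro ⟨_, _, _, h4⟩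
        refine absurd h4 ?_
        rw [show r + ((Pc.toNat : Int) - c.toNat) = r + 1 by omega]; exact hstr
    · have harg : r + 1 + ((Pc.toNat : Int) - Bc'.toNat) = r + ((Pc.toNat : Int) - c.toNat) := by
        rw [hBc']; push_cast; ring
      rw [harg]
      constructor
      · rintro ⟨h1, h2, h3, h4⟩
        refine ⟨(char_lt_iff _ _).mpr ?_, h2, h3, h4⟩
        have := (char_lt_iff _ _).mp h1; omega
      · rintro ⟨h1, h2, h3, h4⟩
        refine ⟨(char_lt_iff _ _).mpr ?_, h2, h3, h4⟩
        have := (char_lt_iff _ _).mp h1; omega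
  | case3 c r h =>
    refine iff_of_false (by simp) ?_
    rintro ⟨h1, h2, h3, _⟩
    have h1' := (char_lt_iff _ _).mp h1
    have h2' := (char_le_iff _ _).mp h2
    have : ¬ (c.toNat < 104) ∨ ¬ (r < 8) := by
      rcases not_and_or.mp h with hl | hr
      · left; intro hx; exact hl ((char_lt_iff c 'h').mpr hx)
      · right; intro hx; exact hr hx
    rcases this with hl | hr
    · have : ('h').toNat = 104 := by decide
      omega
    · omega

-- characterization of A's four rays as one closed-form condition
lemma A_iff (b0 b1 p0 p1 : Char) (hb0 : b0.toNat ≤ 126)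
    (h48 : 48 ≤ b1.toNat) (h57 : b1.toNat ≤ 57) :
    (pvRay1 b0 ((b1.toNat : Int) - 48) p0 p1 || pvRay2 b0 ((b1.toNat : Int) - 48) p0 p1 ||
        pvRay3 b0 ((b1.toNat : Int) - 48) p0 p1 || pvRay4 b0 ((b1.toNat : Int) - 48) p0 p1) = true ↔
      ((49 ≤ p1.toNat ∧ p1.toNat ≤ 56) ∧
       (p0.toNat : Int) - (b0.toNat : Int) ≠ 0 ∧
       ((p0.toNat : Int) - (b0.toNat : Int)).natAbs = ((p1.toNat : Int) - (b1.toNat : Int)).natAbs ∧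
       (b0.toNat < p0.toNat → p0.toNat ≤ 104) ∧
       (p0.toNat < b0.toNat → 97 ≤ p0.toNat)) := by
  have e97 : ('a').toNat = 97 := by decide
  have e104 : ('h').toNat = 104 := by decide
  have hbb : b0.toNat < 55296 := by omega
  rw [Bool.or_eq_true, Bool.or_eq_true, Bool.or_eq_true,
    ray1_iff, ray2_iff _ _ _ _ hbb, ray3_iff _ _ _ _ hbb, ray4_iff]
  constructor
  · rintro (((⟨h1, h2, h3, h4⟩ | ⟨h1, h2, h3, h4⟩) | ⟨h1, h2, h3, h4⟩) | ⟨h1, h2, h3, h4⟩) <;>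
      · have hlt := (char_lt_iff _ _).mp h1
        have hle := (char_le_iff _ _).mp h2
        have hv := (toStr_single _ _ (by omega) (by omega)).mp h4
        refine ⟨⟨by omega, by omega⟩, by omega, by omega, by omega, by omega⟩
  · rintro ⟨⟨hp1l, hp1h⟩, hne, habs, hcl1, hcl2⟩
    by_cases hcol : b0.toNat < p0.toNat
    · by_cases hrow : b1.toNat < p1.toNat
      · exact Or.inr ⟨(char_lt_iff _ _).mpr hcol, (char_le_iff _ _).mpr (by omega), by omega,
          (toStr_single _ _ (by omega) (by omega)).mpr (by omega)⟩
      · refine Or.inl (Or.inl (Or.inl ⟨(char_lt_iff _ _).mpr hcol, (char_le_iff _ _).mpr (by omega),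
          by omega, (toStr_single _ _ (by omega) (by omega)).mpr (by omega)⟩))
    · have hcol' : p0.toNat < b0.toNat := by omega
      by_cases hrow : b1.toNat < p1.toNat
      · refine Or.inl (Or.inl (Or.inr ⟨(char_lt_iff _ _).mpr hcol', (char_le_iff _ _).mpr (by omega),
          by omega, (toStr_single _ _ (by omega) (by omega)).mpr (by omega)⟩))
      · exact Or.inl (Or.inr ⟨(char_lt_iff _ _).mpr hcol', (char_le_iff _ _).mpr (by omega),
          by omega, (toStr_single _ _ (by omega) (by omega)).mpr (by omega)⟩)

lemma files_true {c : Char} (h : 97 ≤ c.toNat ∧ c.toNat ≤ 104) : pvFiles.toList.contains c = true :=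
  (files_iff c).mpr h

lemma files_false {c : Char} (h : ¬ (97 ≤ c.toNat ∧ c.toNat ≤ 104)) : pvFiles.toList.contains c = false := by
  cases hb : pvFiles.toList.contains c
  · rfl
  · exact absurd ((files_iff c).mp hb) h

lemma ranks_true {c : Char} (h : 49 ≤ c.toNat ∧ c.toNat ≤ 56) : pvRanks.toList.contains c = true :=
  (ranks_iff c).mpr h

lemma ranks_false {c : Char} (h : ¬ (49 ≤ c.toNat ∧ c.toNat ≤ 56)) : pvRanks.toList.contains c = false := by
  cases hb : pvRanks.toList.contains c
  · rfl
  · exact absurd ((ranks_iff c).mp hb) h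

-- closed form for B's port once the strings are decomposed
lemma alt_eval (bishop pawn : String) (b0 b1 p0 p1 : Char) (bt pt : List Char)
    (htb : bishop.toList = b0 :: b1 :: bt) (htp : pawn.toList = p0 :: p1 :: pt)
    (h48 : 48 ≤ b1.toNat) (h57 : b1.toNat ≤ 57) :
    bishopAndPawn_alt bishop pawn =
      decide ((97 ≤ b0.toNat ∧ b0.toNat ≤ 104) ∧ (97 ≤ p0.toNat ∧ p0.toNat ≤ 104) ∧
        (49 ≤ p1.toNat ∧ p1.toNat ≤ 56) ∧
        (p0.toNat : Int) - (b0.toNat : Int) ≠ 0 ∧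
        ((p0.toNat : Int) - (b0.toNat : Int)).natAbs = ((p1.toNat : Int) - (b1.toNat : Int)).natAbs) := by
  have gb0 : PySem.Str.pyGet? bishop 0 = some b0 := by simp [PySem.Str.pyGet?, htb]
  have gb1 : PySem.Str.pyGet? bishop 1 = some b1 := by simp [PySem.Str.pyGet?, htb]
  have gp0 : PySem.Str.pyGet? pawn 0 = some p0 := by simp [PySem.Str.pyGet?, htp]
  have gp1 : PySem.Str.pyGet? pawn 1 = some p1 := by simp [PySem.Str.pyGet?, htp]
  have hofb : PySem.Int.ofStr? (String.ofList [b1]) = some ((b1.toNat : Int) - 48) :=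
    ofStr?_digit b1 h48 h57
  unfold bishopAndPawn_alt
  rw [gb1]
  simp only [hofb, gb0, gp0, gp1]
  by_cases h1 : 97 ≤ b0.toNat ∧ b0.toNat ≤ 104
  · by_cases h2 : 97 ≤ p0.toNat ∧ p0.toNat ≤ 104
    · by_cases h3 : 49 ≤ p1.toNat ∧ p1.toNat ≤ 56
      · have hofp : PySem.Int.ofStr? (String.ofList [p1]) = some ((p1.toNat : Int) - 48) :=
          ofStr?_digit p1 (by omega) (by omega)
        simp only [files_true h1, files_true h2, ranks_true h3, Bool.not_true, Bool.or_self,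
          if_false, Bool.false_eq_true, hofp]
        simp only [decide_eq_decide]
        constructor
        · rintro ⟨ha, hb⟩
          exact ⟨h1, h2, h3, ha, by omega⟩
        · rintro ⟨_, _, _, ha, hb⟩
          exact ⟨ha, by omega⟩
      · simp only [ranks_false h3, Bool.not_false, Bool.or_true, if_true]
        symm; rw [decide_eq_false_iff_not]
        rintro ⟨_, _, hx, _⟩
        exact h3 hx
    · simp only [files_false h2, Bool.not_false, Bool.or_true, Bool.true_or, if_true]
      symm; rw [decide_eq_false_iff_not]
      rintro ⟨_, hx, _⟩
      exact h2 hx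
  · simp only [files_false h1, Bool.not_false, Bool.true_or, if_true]
    symm; rw [decide_eq_false_iff_not]
    rintro ⟨hx, _⟩
    exact h1 hx

-- evaluation of A once the strings are decomposed
lemma a_eval (bishop pawn : String) (b0 b1 p0 p1 : Char) (bt pt : List Char)
    (htb : bishop.toList = b0 :: b1 :: bt) (htp : pawn.toList = p0 :: p1 :: pt)
    (h48 : 48 ≤ b1.toNat) (h57 : b1.toNat ≤ 57) :
    bishopAndPawn bishop pawn =
      (pvRay1 b0 ((b1.toNat : Int) - 48) p0 p1 || pvRay2 b0 ((b1.toNat : Int) - 48) p0 p1 ||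
        pvRay3 b0 ((b1.toNat : Int) - 48) p0 p1 || pvRay4 b0 ((b1.toNat : Int) - 48) p0 p1) := by
  have gb0 : PySem.Str.pyGet? bishop 0 = some b0 := by simp [PySem.Str.pyGet?, htb]
  have gb1 : PySem.Str.pyGet? bishop 1 = some b1 := by simp [PySem.Str.pyGet?, htb]
  have gp0 : PySem.Str.pyGet? pawn 0 = some p0 := by simp [PySem.Str.pyGet?, htp]
  have gp1 : PySem.Str.pyGet? pawn 1 = some p1 := by simp [PySem.Str.pyGet?, htp]
  have hofb : PySem.Int.ofStr? (String.ofList [b1]) = some ((b1.toNat : Int) - 48) :=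
    ofStr?_digit b1 h48 h57
  unfold bishopAndPawn
  simp only [gb0, gb1, gp0, gp1, hofb]

lemma str_two (s : String) (h : 2 ≤ s.toList.length) : ∃ c0 c1 t, s.toList = c0 :: c1 :: t := by
  rcases hx : s.toList with _ | ⟨x, _ | ⟨y, t⟩⟩ <;> rw [hx] at h
  · simp at h
  · simp at h
  · exact ⟨x, y, t, rfl⟩

-- ===== VERDICT (by name: the statements are the Claim_ definitions above) =====
theorem bishopAndPawn_spec : Claim_unchanged_bishopAndPawn := by
  intro bishop pawn hdom hpre hnd
  obtain ⟨hlb, hlp, h48, h57⟩ := hpre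
  obtain ⟨b0, b1, bt, htb⟩ := str_two bishop hlb
  obtain ⟨p0, p1, pt, htp⟩ := str_two pawn hlp
  rw [htb] at h48 h57
  simp only [List.getD_cons_succ, List.getD_cons_zero] at h48 h57
  have hb0 : b0.toNat ≤ 126 := by
    have hall : pvDomChar b0 = true := by
      have hd : bishop.toList.all pvDomChar = true := by
        unfold Dom_bishopAndPawn pvDomStr at hdom
        simp only [Bool.and_eq_true] at hdom
        exact hdom.1
      rw [htb] at hd
      simp only [List.all_cons, Bool.and_eq_true] at hd
      exact hd.1
    unfold pvDomChar at hall
    simp only [Bool.or_eq_true, Bool.and_eq_true, decide_eq_true_iff, beq_iff_eq] at hall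
    omega
  unfold D_bishopAndPawn at hnd
  rw [htb, htp] at hnd
  simp only [List.head!_cons, List.tail_cons, char_lt_iff, char_le_iff] at hnd
  have e49 : ('1').toNat = 49 := by decide
  have e56 : ('8').toNat = 56 := by decide
  have e97 : ('a').toNat = 97 := by decide
  have e104 : ('h').toNat = 104 := by decide
  rw [a_eval bishop pawn b0 b1 p0 p1 bt pt htb htp h48 h57,
    alt_eval bishop pawn b0 b1 p0 p1 bt pt htb htp h48 h57,
    Bool.eq_iff_iff, A_iff b0 b1 p0 p1 hb0 h48 h57, decide_eq_true_iff]
  constructor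
  · rintro ⟨hp1, hne, habs, hcl1, hcl2⟩
    by_cases hb0r : 97 ≤ b0.toNat ∧ b0.toNat ≤ 104
    · exact ⟨hb0r, ⟨by omega, by omega⟩, hp1, hne, habs⟩
    · exact (hnd (by omega)).elim
  · rintro ⟨hb0r, hp0r, hp1r, hne, habs⟩
    exact ⟨hp1r, hne, habs, by omega, by omega⟩

theorem bishopAndPawn_changed : Claim_changed_bishopAndPawn := by
  unfold Claim_changed_bishopAndPawn
  refine ⟨by decide, by decide, by decide, ?_, by decide, by decide⟩
  show bishopAndPawn "i8" "h7" = true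
  rw [a_eval "i8" "h7" 'i' '8' 'h' '7' [] [] (by decide) (by decide) (by decide) (by decide)]
  have h3 : pvRay3 'i' ((('8').toNat : Int) - 48) 'h' '7' = true := by
    rw [ray3_iff _ _ _ _ (by decide)]
    exact ⟨by decide, by decide, by decide, by decide⟩
  rw [h3]
  simp

theorem bishopAndPawn_tight : Claim_exact_bishopAndPawn := by
  intro bishop pawn hdom hpre hd
  obtain ⟨hlb, hlp, h48, h57⟩ := hpre
  obtain ⟨b0, b1, bt, htb⟩ := str_two bishop hlb
  obtain ⟨p0, p1, pt, htp⟩ := str_two pawn hlp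
  rw [htb] at h48 h57
  simp only [List.getD_cons_succ, List.getD_cons_zero] at h48 h57
  have hb0 : b0.toNat ≤ 126 := by
    have hall : pvDomChar b0 = true := by
      have hd' : bishop.toList.all pvDomChar = true := by
        unfold Dom_bishopAndPawn pvDomStr at hdom
        simp only [Bool.and_eq_true] at hdom
        exact hdom.1
      rw [htb] at hd'
      simp only [List.all_cons, Bool.and_eq_true] at hd'
      exact hd'.1
    unfold pvDomChar at hall
    simp only [Bool.or_eq_true, Bool.and_eq_true, decide_eq_true_iff, beq_iff_eq] at hall
    omega
  unfold D_bishopAndPawn at hd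
  rw [htb, htp] at hd
  simp only [List.head!_cons, List.tail_cons, char_lt_iff, char_le_iff] at hd
  have e49 : ('1').toNat = 49 := by decide
  have e56 : ('8').toNat = 56 := by decide
  have e97 : ('a').toNat = 97 := by decide
  have e104 : ('h').toNat = 104 := by decide
  rw [a_eval bishop pawn b0 b1 p0 p1 bt pt htb htp h48 h57,
    alt_eval bishop pawn b0 b1 p0 p1 bt pt htb htp h48 h57]
  rw [(A_iff b0 b1 p0 p1 hb0 h48 h57).mpr ⟨⟨by omega, by omega⟩, by omega, by omega, by omega, by omega⟩]
  intro hcontra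
  have hx := of_decide_eq_true hcontra.symm
  omega
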